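-- pv_equiv track=rewrite | github.com/troyfeng116/prob-stats-scripts | src/other/dominated_turtle.py | generate_possible_moves
-- ===== SOURCE A (Python) =====
-- from typing import List
--
-- MOVES = 10
--
-- def generate_possible_moves(li: List[int], forward_ct) -> List[List[int]]:
--     if len(li) == MOVES and forward_ct == MOVES // 2:
--         return [[*li]]
--
--     if forward_ct > MOVES // 2 or len(li) - forward_ct > MOVES // 2:
--         return []
--
--     return generate_possible_moves(
--         li=li + [1], forward_ct=forward_ct + 1
--     ) + generate_possible_moves(li=li + [-1], forward_ct=forward_ct)
-- ===== SOURCE B (Python) =====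
-- from typing import List
--
-- MOVES = 10
--
-- def _comb(n, k):
--     # k-element subsets of range(n) as sorted tuples, in lexicographic order
--     if k == 0:
--         return [()]
--     if n == 0:
--         return []
--     with_zero = [(0,) + tuple(p + 1 for p in t) for t in _comb(n - 1, k - 1)]
--     without_zero = [tuple(p + 1 for p in t) for t in _comb(n - 1, k)]
--     return with_zero + without_zero
--
-- def generate_possible_moves(li: List[int], forward_ct) -> List[List[int]]:
--     remaining = MOVES - len(li)
--     needed = MOVES // 2 - forward_ct
--     if needed < 0 or needed > remaining:
--         return []
--     res = []
--     for pos in _comb(remaining, needed):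
--         tail = [-1] * remaining
--         for p in pos:
--             tail[p] = 1
--         res.append(li + tail)
--     return res
-- ===== Notes on version B (the rewrite author's own statement) =====
-- stated objective: alternative
-- what changed: Replaces A's stateful DFS (which grows the prefix and re-tests the leaf/prune conditions at every node) by a direct combinatorial construction: compute remaining slots and needed +1s, guard once, then enumerate the +1-position sets in lexicographic order and fill each tail.
import Mathlib
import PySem

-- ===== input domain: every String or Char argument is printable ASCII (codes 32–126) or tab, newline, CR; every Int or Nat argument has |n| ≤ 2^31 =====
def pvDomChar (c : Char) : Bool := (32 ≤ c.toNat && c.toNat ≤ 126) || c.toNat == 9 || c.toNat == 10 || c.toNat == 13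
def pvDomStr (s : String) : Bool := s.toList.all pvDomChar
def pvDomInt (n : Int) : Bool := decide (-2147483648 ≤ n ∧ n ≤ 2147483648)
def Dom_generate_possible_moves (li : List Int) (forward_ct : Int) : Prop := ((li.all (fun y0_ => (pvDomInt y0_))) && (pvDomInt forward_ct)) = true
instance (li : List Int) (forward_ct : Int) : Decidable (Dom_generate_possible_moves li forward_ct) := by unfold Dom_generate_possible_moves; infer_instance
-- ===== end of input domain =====

-- B replaces A's prefix-growing DFS by an upfront guard plus lexicographic
-- enumeration of the +1-position sets (alternative decomposition, same cost).

-- ===== PORT A =====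
-- A's DFS: leaf test, prune test, then recurse preferring +1.
def generate_possible_moves (li : List Int) (forward_ct : Int) : List (List Int) :=
  if li.length = 10 ∧ forward_ct = 5 then [li]
  else if forward_ct > 5 ∨ (li.length : Int) - forward_ct > 5 then []
  else
    generate_possible_moves (li ++ [1]) (forward_ct + 1) ++
      generate_possible_moves (li ++ [-1]) forward_ct
termination_by 11 - li.length
decreasing_by
  all_goals
    simp only [not_and, not_or, not_lt, List.length_append, List.length_cons,
      List.length_nil] at *
    omega

-- ===== PORT B =====
-- _comb n k: the k-element subsets of range(n), sorted, in lexicographic order.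
def pvComb : Nat → Nat → List (List Nat)
  | _, 0 => [[]]
  | 0, _ + 1 => []
  | n + 1, k + 1 =>
      (pvComb n k).map (fun t => 0 :: t.map (· + 1)) ++
        (pvComb n (k + 1)).map (fun t => t.map (· + 1))

def generate_possible_moves_alt (li : List Int) (forward_ct : Int) : List (List Int) :=
  let remaining : Int := 10 - li.length
  let needed : Int := 5 - forward_ct
  if needed < 0 ∨ needed > remaining then []
  else
    (pvComb remaining.toNat needed.toNat).map (fun pos =>
      li ++ pos.foldl (fun t p => t.set p 1) (List.replicate remaining.toNat (-1)))

-- ===== PRECONDITION & SPEC =====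
def Spec_generate_possible_moves (li : List Int) (forward_ct : Int) (out : List (List Int)) : Prop := out = generate_possible_moves_alt li forward_ct
instance (li : List Int) (forward_ct : Int) (out : List (List Int)) : Decidable (Spec_generate_possible_moves li forward_ct out) := by unfold Spec_generate_possible_moves; infer_instance

-- ===== CLAIM (what is proved, stated in full; the proofs are below) =====
def Claim_equal_generate_possible_moves : Prop := ∀ (li : List Int) (forward_ct : Int), Dom_generate_possible_moves li forward_ct → Spec_generate_possible_moves li forward_ct (generate_possible_moves li forward_ct)

-- ===== LEMMAS AND PROOFS =====

-- the tail built from a position list (definitionally B's inner foldl)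
def pvTail (r : Nat) (pos : List Nat) : List Int :=
  pos.foldl (fun t p => t.set p 1) (List.replicate r (-1))

theorem pvComb_nil_of_lt : ∀ (n k : Nat), n < k → pvComb n k = [] := by
  intro n
  induction n with
  | zero => intro k h; match k, h with | k + 1, _ => rfl
  | succ m ih =>
      intro k h
      match k, h with
      | k + 1, h =>
        rw [pvComb, ih k (by omega), ih (k + 1) (by omega)]
        rfl

theorem foldl_set_cons (t : List Nat) : ∀ (a : Int) (x : List Int),
    (t.map (· + 1)).foldl (fun s p => s.set p 1) (a :: x) =
      a :: t.foldl (fun s p => s.set p 1) x := by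
  induction t with
  | nil => intro a x; rfl
  | cons p ts ih =>
      intro a x
      simp only [List.map_cons, List.foldl_cons, List.set_cons_succ]
      exact ih a (x.set p 1)

theorem pvTail_zero_cons (r : Nat) (t : List Nat) :
    pvTail (r + 1) (0 :: t.map (· + 1)) = 1 :: pvTail r t := by
  simp only [pvTail, List.replicate_succ, List.foldl_cons, List.set_cons_zero]
  exact foldl_set_cons t 1 (List.replicate r (-1))

theorem pvTail_shift (r : Nat) (t : List Nat) :
    pvTail (r + 1) (t.map (· + 1)) = -1 :: pvTail r t := by
  simp only [pvTail, List.replicate_succ]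
  exact foldl_set_cons t (-1) (List.replicate r (-1))

theorem gpm_empty_fwd (li : List Int) (forward_ct : Int) (h : forward_ct > 5) :
    generate_possible_moves li forward_ct = [] := by
  rw [generate_possible_moves]
  rw [if_neg (by rintro ⟨_, rfl⟩; omega), if_pos (Or.inl h)]

theorem gpm_empty_bwd (li : List Int) (forward_ct : Int)
    (h : (li.length : Int) - forward_ct > 5) :
    generate_possible_moves li forward_ct = [] := by
  rw [generate_possible_moves]
  rw [if_neg (by rintro ⟨h1, h2⟩; omega), if_pos (Or.inr h)]

theorem gpm_main : ∀ (r k : Nat) (li : List Int) (forward_ct : Int),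
    (li.length : Int) = 10 - (r : Int) → forward_ct = 5 - (k : Int) → k ≤ r →
    generate_possible_moves li forward_ct =
      (pvComb r k).map (fun pos => li ++ pvTail r pos) := by
  intro r
  induction r with
  | zero =>
      intro k li fc hlen hfc hk
      interval_cases k
      rw [generate_possible_moves, if_pos ⟨by omega, by omega⟩]
      simp [pvComb, pvTail]
  | succ r ih =>
      intro k li fc hlen hfc hk
      rw [generate_possible_moves]
      rw [if_neg (by rintro ⟨h1, h2⟩; omega),
          if_neg (by rintro (h | h) <;> omega)]
      match k with
      | 0 =>
          rw [gpm_empty_fwd (li ++ [1]) (fc + 1) (by omega)]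
          rw [ih 0 (li ++ [-1]) fc (by simp; omega) (by omega) (by omega)]
          simp [pvComb, pvTail, List.replicate_succ]
      | k + 1 =>
          rw [ih k (li ++ [1]) (fc + 1) (by simp; omega) (by push_cast at hfc ⊢; omega)
                (by omega)]
          have hsecond : generate_possible_moves (li ++ [-1]) fc =
              (pvComb r (k + 1)).map (fun pos => (li ++ [-1]) ++ pvTail r pos) := by
            by_cases hkr : k + 1 ≤ r
            · exact ih (k + 1) (li ++ [-1]) fc (by simp; omega) hfc hkr
            · rw [gpm_empty_bwd (li ++ [-1]) fc (by simp; omega),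
                  pvComb_nil_of_lt r (k + 1) (by omega)]
              rfl
          rw [hsecond, pvComb]
          simp only [List.map_append, List.map_map]
          congr 1 <;>
          · apply List.map_congr_left
            intro t _
            simp [pvTail_zero_cons, pvTail_shift, List.append_assoc]

-- ===== VERDICT (by name: the statement is the Claim_ definition above) =====
theorem generate_possible_moves_spec : Claim_equal_generate_possible_moves := by
  intro li fc _
  unfold Spec_generate_possible_moves generate_possible_moves_alt
  simp only []
  by_cases hguard : (5 - fc < 0) ∨ (5 - fc > 10 - (li.length : Int))
  · rw [if_pos hguard]
    rcases hguard with h | h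
    · exact gpm_empty_fwd li fc (by omega)
    · exact gpm_empty_bwd li fc (by omega)
  · rw [if_neg hguard]
    push Not at hguard
    obtain ⟨h0, h1⟩ := hguard
    have := gpm_main (10 - (li.length : Int)).toNat (5 - fc).toNat li fc
      (by omega) (by omega) (by omega)
    rw [this]
    simp [pvTail]
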